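-- pv_equiv track=rewrite | github.com/gina-yang/Linguistics-Projects | PortmanteauCreator/PortmanteauScratch.py | vowelFinder
-- ===== SOURCE A (Python) =====
-- def vowelFinder(string):
--     vowels = ["a", "e", "i", "o", "u"]
--     counter = 0
--     vowelList = []
--     for i in string:
--         if i in vowels:
--             vowelList.append(counter)
--         counter += 1
--     return vowelList
-- ===== SOURCE B (Python) =====
-- import re
--
-- def vowelFinder(string):
--     return [m.start() for m in re.finditer("[aeiou]", string)]
-- ===== Notes on version B (the rewrite author's own statement) =====
-- stated objective: idiomatic
-- what changed: Replaced the manual counter loop with list-membership tests by a regex scan (re.finditer on the class [aeiou]) collecting each match's start offset.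
import Mathlib
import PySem

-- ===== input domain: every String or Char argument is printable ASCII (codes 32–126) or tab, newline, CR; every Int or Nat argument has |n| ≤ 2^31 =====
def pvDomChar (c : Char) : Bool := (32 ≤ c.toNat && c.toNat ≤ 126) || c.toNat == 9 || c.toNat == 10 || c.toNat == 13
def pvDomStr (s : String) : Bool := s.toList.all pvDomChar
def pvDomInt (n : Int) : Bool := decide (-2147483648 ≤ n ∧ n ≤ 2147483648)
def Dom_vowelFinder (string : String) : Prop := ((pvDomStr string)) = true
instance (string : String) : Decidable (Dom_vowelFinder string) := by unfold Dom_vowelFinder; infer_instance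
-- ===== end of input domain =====

-- B replaces A's counter loop by a regex scan ([aeiou] via re.finditer) collecting match start offsets; idiomatic, same cost.

-- ===== PORT A =====
def vowelFinder (string : String) : List Int :=
  let vowels : List Char := ['a', 'e', 'i', 'o', 'u']
  -- loop state: (counter, vowelList); append counter when i is a vowel, then counter += 1
  (string.toList.foldl
    (fun (st : Int × List Int) (i : Char) =>
      (st.1 + 1, if i ∈ vowels then st.2 ++ [st.1] else st.2))
    (0, [])).2

-- ===== PORT B =====
-- re.finditer("[aeiou]", string) over a single-character class matches exactly the positions
-- whose character is in the class; collecting m.start() = those indices, in order.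
def vowelFinder_alt (string : String) : List Int :=
  ((PySem.List.enumerate string.toList 0).filter
    (fun p => p.2 ∈ (['a', 'e', 'i', 'o', 'u'] : List Char))).map (fun p => p.1)

-- ===== PRECONDITION & SPEC =====
def Spec_vowelFinder (string : String) (out : List Int) : Prop := out = vowelFinder_alt string
instance (string : String) (out : List Int) : Decidable (Spec_vowelFinder string out) := by unfold Spec_vowelFinder; infer_instance

-- ===== CLAIM (what is proved, stated in full; the proofs are below) =====
def Claim_equal_vowelFinder : Prop := ∀ (string : String), Dom_vowelFinder string → Spec_vowelFinder string (vowelFinder string)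

-- ===== LEMMAS AND PROOFS =====

theorem vowelFinder_loop (l : List Char) (c : Int) (acc : List Int) :
    (l.foldl
      (fun (st : Int × List Int) (i : Char) =>
        (st.1 + 1, if i ∈ (['a', 'e', 'i', 'o', 'u'] : List Char) then st.2 ++ [st.1] else st.2))
      (c, acc)).2
    = acc ++ ((PySem.List.enumerate l c).filter
        (fun p => p.2 ∈ (['a', 'e', 'i', 'o', 'u'] : List Char))).map (fun p => p.1) := by
  induction l generalizing c acc with
  | nil => simp [PySem.List.enumerate_nil]
  | cons x xs ih =>
      rw [List.foldl_cons]
      show (List.foldl _ ((c : Int) + 1,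
        if x ∈ (['a', 'e', 'i', 'o', 'u'] : List Char) then acc ++ [c] else acc) xs).2 = _
      rw [ih, PySem.List.enumerate_cons, List.filter_cons]
      by_cases hx : x ∈ (['a', 'e', 'i', 'o', 'u'] : List Char) <;> simp [hx]

-- ===== VERDICT (by name: the statement is the Claim_ definition above) =====
theorem vowelFinder_spec : Claim_equal_vowelFinder := by
  intro s _
  show vowelFinder s = vowelFinder_alt s
  unfold vowelFinder vowelFinder_alt
  rw [vowelFinder_loop]
  simp
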